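-- pv_equiv track=rewrite | github.com/huhutm/python-xxtea-encrypt | xxtea.py | xxtea_encrypt
-- ===== SOURCE A (Python) =====
-- def mx(z, y, sum, e, k, p):
--     return (((z >> 5) ^ (y << 2)) + (((y >> 3) ^ (z << 4)) ^ (sum ^ y)) + (k[(((p) & (3)) ^ e)] ^ z)) & 0xffffffff
--
-- def xxtea_encrypt(v, n, k):
--     DELTA = 0x9e3779b9
--     z = v[n - 1]
--     y = v[0]
--     sum = 0
--
--     if n > 1:
--         q = 6 + 52 // n
--         while (q > 0):
--             sum += DELTA
--             e = (sum >> 2) & 3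
--             p = 0
--             while (p < n-1):
--                  y = v[p + 1]
--                  v[p] += mx(z, y, sum, e, k, p)
--                  v[p] &= 0xffffffff
--                  z = v[p]
--                  p += 1
--
--             y = v[0]
--             v[n - 1] += mx(z, y, sum, e, k, p)
--             v[n - 1] &= 0xffffffff
--             z = v[n - 1]
--             q -= 1
--
--     return v
-- ===== SOURCE B (Python) =====
-- def mx(z, y, sum, e, k, p):
--     return (((z >> 5) ^ (y << 2)) + (((y >> 3) ^ (z << 4)) ^ (sum ^ y)) + (k[(((p) & (3)) ^ e)] ^ z)) & 0xffffffff
--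
--
-- def xxtea_encrypt(v, n, k):
--     DELTA = 0x9e3779b9
--     if n > 1:
--         w = v[:n]          # append-only stream of word values; w[i] is the current
--         z = w[-1]          # value of word i % n, w[i+1] its cyclic neighbour
--         s = 0
--         i = 0
--         for _ in range(6 + 52 // n):
--             s += DELTA
--             e = (s >> 2) & 3
--             for p in range(n):
--                 z = (w[i] + mx(z, w[i + 1], s, e, k, p)) & 0xffffffff
--                 w.append(z)
--                 i += 1
--         v[:n] = w[-n:]
--     return v
-- ===== Notes on version B (the rewrite author's own statement) =====
-- stated objective: alternative
-- what changed: B replaces A's index-based in-place rounds (inner while over p with v[p]/v[p+1] plus a hand-unrolled final v[n-1] update) by an append-only stream buffer with a single read index that runs across all rounds: each step reads w[i] and its neighbour w[i+1], appends the new word, and the result is the last n words; there is no modular index arithmetic and no special-cased last element.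
import Mathlib
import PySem

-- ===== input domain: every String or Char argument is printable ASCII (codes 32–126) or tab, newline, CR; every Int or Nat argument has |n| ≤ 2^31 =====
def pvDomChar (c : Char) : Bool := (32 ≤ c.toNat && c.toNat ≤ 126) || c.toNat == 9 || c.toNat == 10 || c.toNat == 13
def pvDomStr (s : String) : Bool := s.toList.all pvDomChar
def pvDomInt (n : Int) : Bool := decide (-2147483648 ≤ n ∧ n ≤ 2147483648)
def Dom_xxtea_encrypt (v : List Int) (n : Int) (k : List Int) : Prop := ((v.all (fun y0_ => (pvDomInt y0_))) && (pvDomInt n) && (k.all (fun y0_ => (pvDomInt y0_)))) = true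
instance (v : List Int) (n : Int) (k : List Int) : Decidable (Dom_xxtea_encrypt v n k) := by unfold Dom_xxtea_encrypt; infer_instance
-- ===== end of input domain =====

-- B replaces A's index-based in-place rounds by an append-only stream buffer w with one read
-- index i that runs across all rounds: each step reads w[i] and its neighbour w[i+1], appends the
-- new word, and the answer is the last n words; there is no modular/wraparound index arithmetic
-- and no special-cased last element (objective: alternative).
-- A mutates v in place; B performs the equivalent in-place mutation in Python (v[:n] = w);
-- the equivalence proved here is about the RETURN value.

-- ===== PORT A =====
-- shared module helper mx (identical in Source A and Source B).
-- z >> 5 is Python's arithmetic shift = floor-division by 32; y << 2 = y * 4.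
-- k[...] is ported with pyGetD: Pre_ guarantees the index (always in 0..3) is in range.
def mxF (z y s e : Int) (k : List Int) (p : Int) : Int :=
  (PySem.Int.band
    ((PySem.Int.bxor (PySem.Int.floordiv z 32) (y * 4)) +
     (PySem.Int.bxor (PySem.Int.bxor (PySem.Int.floordiv y 8) (z * 16)) (PySem.Int.bxor s y)) +
     (PySem.Int.bxor (PySem.List.pyGetD k (PySem.Int.bxor (PySem.Int.band p 3) e) 0) z))
    4294967295)

-- A's inner 'while p < n-1' loop; fuel = number of remaining iterations (p steps up by 1 each time,
-- so fuel (n-1-p).toNat makes the fuel guard coincide with the while condition). Returns (v, z, p).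
def innerA (n : Int) (k : List Int) (s e : Int) : Nat → List Int → Int → Int → List Int × Int × Int
  | 0, v, z, p => (v, z, p)
  | fuel + 1, v, z, p =>
    if p < n - 1 then
      let y := PySem.List.pyGetD v (p + 1) 0
      let nv := PySem.List.pyGetD v p 0 + mxF z y s e k p
      let nv := PySem.Int.band nv 4294967295
      innerA n k s e fuel (PySem.List.pySetD v p nv) nv (p + 1)
    else (v, z, p)

-- A's outer 'while q > 0' loop (q steps down by 1, so fuel = q.toNat iterations).
def outerA (n : Int) (k : List Int) : Nat → List Int → Int → Int → List Int
  | 0, v, _, _ => v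
  | fuel + 1, v, z, s =>
    let s := s + 2654435769
    let e := PySem.Int.band (PySem.Int.floordiv s 4) 3
    let r := innerA n k s e (n - 1).toNat v z 0
    let y := PySem.List.pyGetD r.1 0 0
    let nv := PySem.List.pyGetD r.1 (n - 1) 0 + mxF r.2.1 y s e k r.2.2
    let nv := PySem.Int.band nv 4294967295
    outerA n k fuel (PySem.List.pySetD r.1 (n - 1) nv) nv s

def xxtea_encrypt (v : List Int) (n : Int) (k : List Int) : List Int :=
  -- z = v[n-1]; y = v[0] (y is dead before the loop overwrites it): ported with pyGetD, Pre_
  -- guarantees both indices are in range.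
  let z := PySem.List.pyGetD v (n - 1) 0
  let _y := PySem.List.pyGetD v 0 0
  if 1 < n then
    let q := 6 + PySem.Int.floordiv 52 n
    outerA n k q.toNat v z 0
  else v

-- ===== PORT B =====
-- one stream step: z = (w[i] + mx(z, w[i+1], s, e, k, p)) & M; w.append(z); i += 1
-- state st = (w, z, i)
def stepS (k : List Int) (s e : Int) (st : List Int × Int × Int) (p : Int) : List Int × Int × Int :=
  let z := PySem.Int.band
      (PySem.List.pyGetD st.1 st.2.2 0 + mxF st.2.1 (PySem.List.pyGetD st.1 (st.2.2 + 1) 0) s e k p)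
      4294967295
  (st.1 ++ [z], z, st.2.2 + 1)

-- one round: s += DELTA; e = (s >> 2) & 3; inner for-loop over range(n); state (w, z, s, i)
def roundS (n : Int) (k : List Int) (st : List Int × Int × Int × Int) (_r : Int) :
    List Int × Int × Int × Int :=
  let s := st.2.2.1 + 2654435769
  let e := PySem.Int.band (PySem.Int.floordiv s 4) 3
  let w := (PySem.List.pyRange 0 n 1).foldl (stepS k s e) (st.1, st.2.1, st.2.2.2)
  (w.1, w.2.1, s, w.2.2)

def xxtea_encrypt_alt (v : List Int) (n : Int) (k : List Int) : List Int :=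
  if 1 < n then
    let w0 := PySem.List.slice v none (some n)                 -- w = v[:n]
    let z := PySem.List.pyGetD w0 (-1) 0                       -- z = w[-1]; in range under Pre_
    let r := (PySem.List.pyRange 0 (6 + PySem.Int.floordiv 52 n) 1).foldl (roundS n k) (w0, z, 0, 0)
    PySem.List.slice r.1 (some (-n)) none ++ PySem.List.slice v (some n) none   -- v[:n] = w[-n:]
  else v

-- ===== PRECONDITION & SPEC =====
-- Exactly the inputs on which the Python A returns: v[n-1] and v[0] must exist (v nonempty and
-- 1 - len(v) ≤ n ≤ len(v), so a negative n may still be a valid Python index), and for n > 1 the key lookups k[(p&3)^e]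
-- cover all of 0..3, so len(k) ≥ 4.
def Pre_xxtea_encrypt (v : List Int) (n : Int) (k : List Int) : Prop :=
  v ≠ [] ∧ 1 - (v.length : Int) ≤ n ∧ n ≤ (v.length : Int) ∧ (1 < n → 4 ≤ (k.length : Int))
instance (v : List Int) (n : Int) (k : List Int) : Decidable (Pre_xxtea_encrypt v n k) := by
  unfold Pre_xxtea_encrypt; infer_instance
def pvWitness_xxtea_encrypt : List Int × Int × List Int := ([1, 2, 3], 3, [7, 8, 9, 10])

def Spec_xxtea_encrypt (v : List Int) (n : Int) (k : List Int) (out : List Int) : Prop := out = xxtea_encrypt_alt v n k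
instance (v : List Int) (n : Int) (k : List Int) (out : List Int) : Decidable (Spec_xxtea_encrypt v n k out) := by unfold Spec_xxtea_encrypt; infer_instance

-- ===== CLAIM (what is proved, stated in full; the proofs are below) =====
def Claim_equal_xxtea_encrypt : Prop := ∀ (v : List Int) (n : Int) (k : List Int), Dom_xxtea_encrypt v n k → Pre_xxtea_encrypt v n k → Spec_xxtea_encrypt v n k (xxtea_encrypt v n k)

-- ===== LEMMAS AND PROOFS =====

-- Proof-side intermediate program M: A's round written as one fold with modular neighbour
-- indexing.  A is proved equal to M (inner_eq/outer_eq), M equal to B (the rotation invariant).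
def stepM (n : Int) (k : List Int) (s e : Int) (st : List Int × Int) (p : Int) : List Int × Int :=
  let y := PySem.List.pyGetD st.1 (PySem.Int.mod (p + 1) n) 0
  let nv := PySem.Int.band (PySem.List.pyGetD st.1 p 0 + mxF st.2 y s e k p) 4294967295
  (PySem.List.pySetD st.1 p nv, nv)

def roundM (n : Int) (k : List Int) (st : List Int × Int × Int) (_r : Int) : List Int × Int × Int :=
  let s := st.2.2 + 2654435769
  let e := PySem.Int.band (PySem.Int.floordiv s 4) 3
  let w := (PySem.List.pyRange 0 n 1).foldl (stepM n k s e) (st.1, st.2.1)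
  (w.1, w.2, s)

-- the rotated view of M's list: w = v[p:n] ++ v[:p]
def rotL (v : List Int) (N P : Nat) : List Int := (v.take N).drop P ++ v.take P

-- proof-side intermediate program R: one full round of B's stream written as a rotating
-- window of n words (the stream's live window w[i:]): update the head with neighbour w[1],
-- append, drop the head.
def stepR (k : List Int) (s e : Int) (st : List Int × Int) (p : Int) : List Int × Int :=
  let z := PySem.Int.band
      (PySem.List.pyGetD st.1 0 0 + mxF st.2 (PySem.List.pyGetD st.1 1 0) s e k p) 4294967295
  ((st.1 ++ [z]).drop 1, z)

def roundR (n : Int) (k : List Int) (st : List Int × Int × Int) (_r : Int) : List Int × Int × Int :=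
  let s := st.2.2 + 2654435769
  let e := PySem.Int.band (PySem.Int.floordiv s 4) 3
  let w := (PySem.List.pyRange 0 n 1).foldl (stepR k s e) (st.1, st.2.1)
  (w.1, w.2, s)

-- A's inner loop run to exhaustion, followed by A's unrolled last-element update, equals M's
-- fold of stepM over pyRange p n 1.  Induction on the remaining fuel n-1-p.
theorem inner_eq (n : Int) (k : List Int) (s e : Int) (hn : 1 < n) :
    ∀ (fuel : Nat) (v : List Int) (z p : Int), 0 ≤ p → p + fuel = n - 1 →
      (let r := innerA n k s e fuel v z p
       let y := PySem.List.pyGetD r.1 0 0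
       let nv := PySem.Int.band (PySem.List.pyGetD r.1 (n - 1) 0 + mxF r.2.1 y s e k r.2.2) 4294967295
       ((PySem.List.pySetD r.1 (n - 1) nv, nv) : List Int × Int)) =
      (PySem.List.pyRange p n 1).foldl (stepM n k s e) (v, z) := by
  intro fuel
  induction fuel with
  | zero =>
    intro v z p hp hpf
    have hp' : p = n - 1 := by omega
    subst hp'
    have hmod : PySem.Int.mod (n - 1 + 1) n = 0 := by
      have h1 : n - 1 + 1 = n := by ring
      rw [h1, PySem.Int.mod_eq_emod_of_pos (by omega)]
      simp
    rw [PySem.List.pyRange_one_cons (by omega), PySem.List.pyRange_one_eq_nil (by omega)]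
    simp only [innerA, List.foldl, stepM, hmod, PySem.List.pyGetD_zero]
  | succ fuel ih =>
    intro v z p hp hpf
    have hlt : p < n - 1 := by omega
    rw [PySem.List.pyRange_one_cons (by omega)]
    simp only [innerA, if_pos hlt, List.foldl]
    have hstep : stepM n k s e (v, z) p =
        (PySem.List.pySetD v p
           (PySem.Int.band (PySem.List.pyGetD v p 0 + mxF z (PySem.List.pyGetD v (p + 1) 0) s e k p) 4294967295),
         PySem.Int.band (PySem.List.pyGetD v p 0 + mxF z (PySem.List.pyGetD v (p + 1) 0) s e k p) 4294967295) := by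
      simp only [stepM]
      have hmod : PySem.Int.mod (p + 1) n = p + 1 := by
        rw [PySem.Int.mod_eq_emod_of_pos (by omega)]
        exact Int.emod_eq_of_lt (by omega) (by omega)
      rw [hmod]
    rw [hstep]
    exact ih _ _ _ (by omega) (by omega)

-- A's outer loop equals the fold of roundM, for any list of round markers of the right length
-- (roundM ignores the marker's value).
theorem outer_eq (n : Int) (k : List Int) (hn : 1 < n) :
    ∀ (l : List Int) (v : List Int) (z s : Int),
      outerA n k l.length v z s = ((l.foldl (roundM n k) (v, z, s)).1 : List Int) := by
  intro l
  induction l with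
  | nil => intro v z s; simp [outerA]
  | cons a t ih =>
    intro v z s
    simp only [List.length_cons, List.foldl, outerA]
    rw [ih]
    congr 1
    simp only [roundM]
    have := inner_eq n k (s + 2654435769)
      (PySem.Int.band (PySem.Int.floordiv (s + 2654435769) 4) 3) hn (n - 1).toNat v z 0
      (by omega) (by omega)
    simp only at this
    rw [← this]

theorem length_pyRange_zero (q : Int) : (PySem.List.pyRange 0 q 1).length = q.toNat := by
  rw [PySem.List.length_pyRange_one]; omega

-- one rotation step simulates one M step (0 ≤ p < n ≤ |v|)
theorem step_rot (n : Int) (k : List Int) (s e : Int) (hn : 1 < n)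
    (v : List Int) (z p : Int) (hp : 0 ≤ p) (hpn : p < n) (hlen : n ≤ (v.length : Int)) :
    stepR k s e (rotL v n.toNat p.toNat, z) p =
      (rotL (stepM n k s e (v, z) p).1 n.toNat (p.toNat + 1), (stepM n k s e (v, z) p).2) := by
  have hN : n.toNat ≤ v.length := by omega
  have hPN : p.toNat < n.toNat := by omega
  have htk : (v.take n.toNat).length = n.toNat := by simp; omega
  have hdl : ((v.take n.toNat).drop p.toNat).length = n.toNat - p.toNat := by simp [htk]
  have h0 : PySem.List.pyGetD (rotL v n.toNat p.toNat) 0 0 = PySem.List.pyGetD v p 0 := by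
    rw [rotL, PySem.List.pyGetD_eq_getElem _ _ (by omega)
        (by simp [hdl]; omega),
      PySem.List.pyGetD_eq_getElem _ _ hp (by omega)]
    rw [List.getElem_append_left (by omega), List.getElem_drop, List.getElem_take]
    simp
  have h1 : PySem.List.pyGetD (rotL v n.toNat p.toNat) 1 0 =
      PySem.List.pyGetD v (PySem.Int.mod (p + 1) n) 0 := by
    by_cases hc : p + 1 < n
    · have hmod : PySem.Int.mod (p + 1) n = p + 1 := by
        rw [PySem.Int.mod_eq_emod_of_pos (by omega)]
        exact Int.emod_eq_of_lt (by omega) (by omega)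
      rw [hmod, rotL, PySem.List.pyGetD_eq_getElem _ _ (by omega) (by simp [hdl]; omega),
        PySem.List.pyGetD_eq_getElem _ _ (by omega) (by omega)]
      rw [List.getElem_append_left (by omega), List.getElem_drop, List.getElem_take]
      congr 1
      omega
    · have hpn' : p + 1 = n := by omega
      have hmod : PySem.Int.mod (p + 1) n = 0 := by
        rw [hpn', PySem.Int.mod_eq_emod_of_pos (by omega)]
        simp
      have hP1 : p.toNat + 1 = n.toNat := by omega
      have hP : 1 ≤ p.toNat := by omega
      rw [hmod, rotL, PySem.List.pyGetD_eq_getElem _ _ (by omega)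
          (by simp [hdl]; omega),
        PySem.List.pyGetD_eq_getElem _ _ (by omega) (by omega)]
      rw [List.getElem_append_right (by omega)]
      simp [hdl, List.getElem_take, show n.toNat - p.toNat = 1 from by omega]
  simp only [stepR, stepM, h0, h1]
  refine Prod.ext ?_ rfl
  simp only
  generalize (PySem.Int.band (PySem.List.pyGetD v p 0 +
    mxF z (PySem.List.pyGetD v (PySem.Int.mod (p + 1) n) 0) s e k p) 4294967295) = nv
  rw [PySem.List.pySetD_of_nonneg _ _ hp, rotL, rotL]
  rw [List.take_set, List.drop_set, if_pos (by omega)]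
  rw [List.drop_eq_getElem_cons (i := p.toNat) (by omega)]
  rw [List.take_set, List.take_add_one]
  have hsome : v[p.toNat]?.toList = [v[p.toNat]'(by omega)] := by
    simp [List.getElem?_eq_getElem (by omega : p.toNat < v.length)]
  rw [hsome, List.set_append, if_neg (by simp)]
  have hz : p.toNat - (List.take p.toNat v).length = 0 := by simp [List.length_take]; omega
  rw [hz]
  simp [List.cons_append]

-- M's fold preserves length and everything from position n on
theorem stepM_frame (n : Int) (k : List Int) (s e : Int) :
    ∀ (l : List Int), (∀ p ∈ l, 0 ≤ p ∧ p < n) → ∀ (v : List Int) (z : Int),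
      ((l.foldl (stepM n k s e) (v, z)).1.length = v.length ∧
       (l.foldl (stepM n k s e) (v, z)).1.drop n.toNat = v.drop n.toNat) := by
  intro l
  induction l with
  | nil => intro _ v z; exact ⟨rfl, rfl⟩
  | cons a t ih =>
    intro hb v z
    obtain ⟨ha0, han⟩ := hb a (List.mem_cons_self ..)
    simp only [List.foldl]
    obtain ⟨ih1, ih2⟩ := ih (fun p hp => hb p (List.mem_cons_of_mem _ hp)) (stepM n k s e (v, z) a).1 (stepM n k s e (v, z) a).2
    have hset : (stepM n k s e (v, z) a).1.length = v.length ∧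
        (stepM n k s e (v, z) a).1.drop n.toNat = v.drop n.toNat := by
      simp only [stepM, PySem.List.pySetD_of_nonneg _ _ ha0]
      refine ⟨by simp, ?_⟩
      rw [List.drop_set, if_pos (by omega)]
    exact ⟨by rw [ih1, hset.1], by rw [ih2, hset.2]⟩

-- the rotation fold over one round equals M's fold, viewed through take n
theorem inner_rot (n : Int) (k : List Int) (s e : Int) (hn : 1 < n) :
    ∀ (fuel : Nat) (p : Int) (v : List Int) (z : Int), 0 ≤ p → p + fuel = n →
      n ≤ (v.length : Int) →
      (PySem.List.pyRange p n 1).foldl (stepR k s e) (rotL v n.toNat p.toNat, z) =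
        (((PySem.List.pyRange p n 1).foldl (stepM n k s e) (v, z)).1.take n.toNat,
         ((PySem.List.pyRange p n 1).foldl (stepM n k s e) (v, z)).2) := by
  intro fuel
  induction fuel with
  | zero =>
    intro p v z hp hpf hlen
    rw [PySem.List.pyRange_one_eq_nil (by omega)]
    simp only [List.foldl]
    have hpt : p.toNat = n.toNat := by omega
    rw [hpt]
    have : rotL v n.toNat n.toNat = v.take n.toNat := by
      rw [rotL, List.drop_eq_nil_of_le (by simp)]
      simp
    rw [this]
  | succ fuel ih =>
    intro p v z hp hpf hlen
    rw [PySem.List.pyRange_one_cons (by omega)]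
    simp only [List.foldl]
    rw [step_rot n k s e hn v z p hp (by omega) hlen]
    have hcast : p.toNat + 1 = (p + 1).toNat := by omega
    rw [hcast]
    have hlen' : n ≤ ((stepM n k s e (v, z) p).1.length : Int) := by
      simp only [stepM, PySem.List.pySetD_of_nonneg _ _ hp]
      simpa using hlen
    exact ih (p + 1) (stepM n k s e (v, z) p).1 (stepM n k s e (v, z) p).2 (by omega) (by omega) hlen'

-- lifted to the outer fold
theorem outer_rot (n : Int) (k : List Int) (hn : 1 < n) :
    ∀ (l : List Int) (v : List Int) (z s : Int), n ≤ (v.length : Int) →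
      (l.foldl (roundR n k) (v.take n.toNat, z, s) =
         (((l.foldl (roundM n k) (v, z, s)).1.take n.toNat,
           (l.foldl (roundM n k) (v, z, s)).2.1, (l.foldl (roundM n k) (v, z, s)).2.2)) ∧
       (l.foldl (roundM n k) (v, z, s)).1.length = v.length ∧
       (l.foldl (roundM n k) (v, z, s)).1.drop n.toNat = v.drop n.toNat) := by
  intro l
  induction l with
  | nil => intro v z s _; exact ⟨rfl, rfl, rfl⟩
  | cons a t ih =>
    intro v z s hlen
    simp only [List.foldl]
    have hbounds : ∀ p ∈ PySem.List.pyRange 0 n 1, 0 ≤ p ∧ p < n := by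
      intro p hp
      rw [PySem.List.mem_pyRange_one] at hp
      exact hp
    obtain ⟨hf1, hf2⟩ := stepM_frame n k (s + 2654435769)
      (PySem.Int.band (PySem.Int.floordiv (s + 2654435769) 4) 3) _ hbounds v z
    have hR : roundR n k (v.take n.toNat, z, s) a =
        ((roundM n k (v, z, s) a).1.take n.toNat, (roundM n k (v, z, s) a).2.1,
         (roundM n k (v, z, s) a).2.2) := by
      simp only [roundR, roundM]
      have h0 : rotL v n.toNat (0 : Int).toNat = v.take n.toNat := by
        simp [rotL]
      rw [← h0, inner_rot n k (s + 2654435769)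
        (PySem.Int.band (PySem.Int.floordiv (s + 2654435769) 4) 3) hn n.toNat 0 v z
        (le_refl 0) (by omega) hlen]
    have hlen' : n ≤ (((roundM n k (v, z, s) a).1.length : Int)) := by
      simp only [roundM]
      omega
    obtain ⟨ih1, ih2, ih3⟩ := ih (roundM n k (v, z, s) a).1 (roundM n k (v, z, s) a).2.1
      (roundM n k (v, z, s) a).2.2 hlen'
    refine ⟨?_, ?_, ?_⟩
    · rw [hR]; exact ih1
    · rw [ih2]; simpa only [roundM] using hf1
    · rw [ih3]; simpa only [roundM] using hf2

-- B's stream inner loop, seen through its live window w[i:], is R's rotation inner loop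
theorem innerS_window (n : Int) (k : List Int) (s e : Int) (hn : 1 < n) :
    ∀ (l : List Int) (w : List Int) (z i : Int), 0 ≤ i → i + n = (w.length : Int) →
      ((l.foldl (stepS k s e) (w, z, i)).2.1 = (l.foldl (stepR k s e) (w.drop i.toNat, z)).2 ∧
       (l.foldl (stepS k s e) (w, z, i)).2.2 = i + l.length ∧
       ((l.foldl (stepS k s e) (w, z, i)).1.length : Int) = (w.length : Int) + l.length ∧
       (l.foldl (stepS k s e) (w, z, i)).1.drop
           (l.foldl (stepS k s e) (w, z, i)).2.2.toNat =
         (l.foldl (stepR k s e) (w.drop i.toNat, z)).1) := by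
  intro l
  induction l with
  | nil => intro w z i hi hiw; exact ⟨rfl, by simp, by simp, by simp⟩
  | cons a t ih =>
    intro w z i hi hiw
    simp only [List.foldl]
    have hg0 : PySem.List.pyGetD w i 0 = PySem.List.pyGetD (w.drop i.toNat) 0 0 := by
      rw [PySem.List.pyGetD_eq_getElem _ _ hi (by omega),
        PySem.List.pyGetD_eq_getElem _ _ (by omega) (by simp; omega)]
      simp [List.getElem_drop]
    have hg1 : PySem.List.pyGetD w (i + 1) 0 = PySem.List.pyGetD (w.drop i.toNat) 1 0 := by
      rw [PySem.List.pyGetD_eq_getElem _ _ (by omega) (by omega),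
        PySem.List.pyGetD_eq_getElem _ _ (by omega) (by simp; omega)]
      rw [List.getElem_drop]
      congr 1
      omega
    have hstep : stepS k s e (w, z, i) a =
        (w ++ [(stepR k s e (w.drop i.toNat, z) a).2], (stepR k s e (w.drop i.toNat, z) a).2,
         i + 1) := by
      simp only [stepS, stepR, hg0, hg1]
    have hdropstep : (stepS k s e (w, z, i) a).1.drop (i + 1).toNat =
        (stepR k s e (w.drop i.toNat, z) a).1 := by
      rw [hstep]
      simp only [stepR]
      rw [List.drop_append_of_le_length (by omega),
        List.drop_append_of_le_length (by simp; omega), List.drop_drop]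
      congr 2
      omega
    rw [hstep]
    obtain ⟨ih1, ih2, ih3, ih4⟩ := ih (w ++ [(stepR k s e (w.drop i.toNat, z) a).2])
      (stepR k s e (w.drop i.toNat, z) a).2 (i + 1) (by omega) (by simp; omega)
    have hwin : (w ++ [(stepR k s e (w.drop i.toNat, z) a).2]).drop (i + 1).toNat =
        (stepR k s e (w.drop i.toNat, z) a).1 := by
      rw [hstep] at hdropstep
      exact hdropstep
    rw [hwin] at ih1 ih4
    refine ⟨?_, ?_, ?_, ?_⟩
    · rw [ih1]
    · rw [ih2]; simp; omega
    · rw [ih3]; simp; omega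
    · rw [ih4]

-- lifted to one round: B's round on (w, z, s, i) is R's round on the window (w[i:], z, s)
theorem roundS_eq (n : Int) (k : List Int) (hn : 1 < n)
    (w : List Int) (z s i : Int) (hi : 0 ≤ i) (hiw : i + n = (w.length : Int)) (a : Int) :
    (((roundS n k (w, z, s, i) a).1.drop (roundS n k (w, z, s, i) a).2.2.2.toNat,
      (roundS n k (w, z, s, i) a).2.1, (roundS n k (w, z, s, i) a).2.2.1) =
        roundR n k (w.drop i.toNat, z, s) a) ∧
    (roundS n k (w, z, s, i) a).2.2.2 = i + n ∧
    ((roundS n k (w, z, s, i) a).1.length : Int) = (w.length : Int) + n := by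
  obtain ⟨h1, h2, h3, h4⟩ := innerS_window n k (s + 2654435769)
    (PySem.Int.band (PySem.Int.floordiv (s + 2654435769) 4) 3) hn
    (PySem.List.pyRange 0 n 1) w z i hi hiw
  have hlr : ((PySem.List.pyRange 0 n 1).length : Int) = n := by
    rw [length_pyRange_zero]; omega
  simp only [roundS, roundR]
  refine ⟨?_, by rw [h2, hlr], by rw [h3, hlr]⟩
  refine Prod.ext ?_ (Prod.ext ?_ rfl)
  · simpa using h4
  · simpa using h1

-- lifted to the outer fold of rounds
theorem outerS_eq (n : Int) (k : List Int) (hn : 1 < n) :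
    ∀ (l : List Int) (w : List Int) (z s i : Int), 0 ≤ i → i + n = (w.length : Int) →
      (0 ≤ (l.foldl (roundS n k) (w, z, s, i)).2.2.2 ∧
       (l.foldl (roundS n k) (w, z, s, i)).2.2.2 + n =
         ((l.foldl (roundS n k) (w, z, s, i)).1.length : Int) ∧
       (l.foldl (roundS n k) (w, z, s, i)).1.drop
           (l.foldl (roundS n k) (w, z, s, i)).2.2.2.toNat =
         (l.foldl (roundR n k) (w.drop i.toNat, z, s)).1) := by
  intro l
  induction l with
  | nil => intro w z s i hi hiw; exact ⟨hi, by simpa using hiw, rfl⟩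
  | cons a t ih =>
    intro w z s i hi hiw
    simp only [List.foldl]
    obtain ⟨hR, hi', hlen'⟩ := roundS_eq n k hn w z s i hi hiw a
    obtain ⟨ih1, ih2, ih3⟩ := ih (roundS n k (w, z, s, i) a).1 (roundS n k (w, z, s, i) a).2.1
      (roundS n k (w, z, s, i) a).2.2.1 (roundS n k (w, z, s, i) a).2.2.2 (by omega) (by omega)
    refine ⟨ih1, ih2, ?_⟩
    rw [ih3, hR]

-- ===== VERDICT (by name: the statement is the Claim_ definition above) =====
theorem xxtea_encrypt_spec : Claim_equal_xxtea_encrypt := by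
  intro v n k _hDom hPre
  obtain ⟨hne, hlo, hhi, hk⟩ := hPre
  unfold Spec_xxtea_encrypt xxtea_encrypt xxtea_encrypt_alt
  by_cases hn : 1 < n
  · simp only [if_pos hn]
    -- A's side: outerA = fold of roundM
    rw [← length_pyRange_zero (6 + PySem.Int.floordiv 52 n),
      outer_eq n k hn _ v (PySem.List.pyGetD v (n - 1) 0) 0]
    -- B's slices
    have hcn : n = ((n.toNat : Nat) : Int) := by omega
    have hsl1 : PySem.List.slice v none (some n) = v.take n.toNat := by
      rw [hcn, PySem.List.slice_to_natCast]
      congr 1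
    have hsl2 : PySem.List.slice v (some n) none = v.drop n.toNat := by
      rw [hcn, PySem.List.slice_from_natCast]
      congr 1
    -- B's z = w[-1] equals A's z = v[n-1]
    have hz : PySem.List.pyGetD (v.take n.toNat) (-1) 0 = PySem.List.pyGetD v (n - 1) 0 := by
      have h1 : (-1 : Int) = -((1 : Nat) : Int) := by simp
      rw [h1, PySem.List.pyGetD_neg_natCast _ 1 0 (by omega) (by simp; omega),
        PySem.List.pyGetD_eq_getElem _ _ (by omega) (by omega)]
      rw [List.getElem_take]
      congr 1
      simp
      omega
    rw [hsl1, hsl2, hz]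
    -- B's stream fold, seen through its final window, is the rotation fold R
    obtain ⟨hS0, hSlen, hSdrop⟩ := outerS_eq n k hn
      (PySem.List.pyRange 0 (6 + PySem.Int.floordiv 52 n) 1) (v.take n.toNat)
      (PySem.List.pyGetD v (n - 1) 0) 0 0 (le_refl 0) (by simp; omega)
    simp only [Int.toNat_zero, List.drop_zero] at hSdrop
    have hslc : PySem.List.slice
        ((PySem.List.pyRange 0 (6 + PySem.Int.floordiv 52 n) 1).foldl (roundS n k)
          (v.take n.toNat, PySem.List.pyGetD v (n - 1) 0, 0, 0)).1 (some (-n)) none =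
        ((PySem.List.pyRange 0 (6 + PySem.Int.floordiv 52 n) 1).foldl (roundS n k)
          (v.take n.toNat, PySem.List.pyGetD v (n - 1) 0, 0, 0)).1.drop
          ((PySem.List.pyRange 0 (6 + PySem.Int.floordiv 52 n) 1).foldl (roundS n k)
            (v.take n.toNat, PySem.List.pyGetD v (n - 1) 0, 0, 0)).2.2.2.toNat := by
      rw [show (-n) = -((n.toNat : Nat) : Int) from by omega,
        PySem.List.slice_from_neg_natCast _ n.toNat (by omega)]
      congr 1
      omega
    rw [hslc, hSdrop]
    -- the rotation fold R equals A's fold of roundM, viewed through take n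
    obtain ⟨hrot, hlenM, hdropM⟩ := outer_rot n k hn (PySem.List.pyRange 0 (6 + PySem.Int.floordiv 52 n) 1)
      v (PySem.List.pyGetD v (n - 1) 0) 0 (by omega)
    rw [hrot]
    simp only
    conv_lhs => rw [← List.take_append_drop n.toNat
      ((PySem.List.pyRange 0 (6 + PySem.Int.floordiv 52 n) 1).foldl (roundM n k)
        (v, PySem.List.pyGetD v (n - 1) 0, 0)).1]
    rw [hdropM]
  · simp [if_neg hn]
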